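-- pv_equiv track=rewrite | github.com/damir-gavric/ScanSweep | processor.py | apply_quote_style_to_text
-- ===== SOURCE A (Python) =====
-- QUOTE_STYLES = {
--     "english-double": ('"', '"'),
--     "english-single": ("'", "'"),
--     "serbian": ("„", "”"),
--     "german": ("„", "“"),
-- }
--
-- def apply_quote_style_to_text(txt, quote_language):
--     opening_quote, closing_quote = QUOTE_STYLES.get(quote_language, QUOTE_STYLES["english-double"])
--     result = []
--     inside_quotes = False
--     for char in txt:
--         if char == '"':
--             result.append(closing_quote if inside_quotes else opening_quote)
--             inside_quotes = not inside_quotes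
--         else:
--             result.append(char)
--     return "".join(result)
-- ===== SOURCE B (Python) =====
-- QUOTE_STYLES = {
--     "english-double": ('"', '"'),
--     "english-single": ("'", "'"),
--     "serbian": ("„", "”"),
--     "german": ("„", "“"),
-- }
--
-- def apply_quote_style_to_text(txt, quote_language):
--     opening_quote, closing_quote = QUOTE_STYLES.get(quote_language, QUOTE_STYLES["english-double"])
--     parts = txt.split('"')
--     out = [parts[0]]
--     for i, seg in enumerate(parts[1:], 1):
--         out.append(opening_quote if i % 2 == 1 else closing_quote)
--         out.append(seg)
--     return "".join(out)
-- ===== Notes on version B (the rewrite author's own statement) =====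
-- stated objective: alternative
-- what changed: Replaces the char-by-char loop with an inside_quotes toggle by splitting the text on '"' once and interleaving opening/closing quotes (by gap parity) between the segments.
import Mathlib
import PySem

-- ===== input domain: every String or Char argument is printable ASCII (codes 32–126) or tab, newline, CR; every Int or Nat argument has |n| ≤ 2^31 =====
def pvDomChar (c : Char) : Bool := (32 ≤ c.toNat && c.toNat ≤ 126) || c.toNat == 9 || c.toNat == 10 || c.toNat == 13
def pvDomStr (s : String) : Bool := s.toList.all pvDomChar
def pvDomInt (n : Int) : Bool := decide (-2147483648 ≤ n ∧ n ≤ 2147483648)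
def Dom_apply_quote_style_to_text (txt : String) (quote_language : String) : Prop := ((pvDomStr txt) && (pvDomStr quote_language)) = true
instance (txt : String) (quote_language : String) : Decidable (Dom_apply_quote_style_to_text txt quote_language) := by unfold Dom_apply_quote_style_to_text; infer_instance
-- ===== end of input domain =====

-- B replaces A's char-by-char loop with its inside_quotes toggle by one split on '"' plus
-- parity-alternating quotes interleaved between the segments (alternative decomposition, same cost).

-- ===== PORT A =====
-- module constant QUOTE_STYLES (shared context of both versions)
def pvQUOTE_STYLES : PySem.Dict String (String × String) :=
  PySem.Dict.ofList
    [("english-double", ("\"", "\"")),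
     ("english-single", ("'", "'")),
     ("serbian", ("„", "”")),
     ("german", ("„", "“"))]

def apply_quote_style_to_text (txt : String) (quote_language : String) : String :=
  let qs := pvQUOTE_STYLES.getD quote_language (pvQUOTE_STYLES.getD "english-double" ("\"", "\""))
  let st := txt.toList.foldl
    (fun (s : List String × Bool) char =>
      if char == '"' then
        (s.1 ++ [if s.2 then qs.2 else qs.1], !s.2)
      else
        (s.1 ++ [String.ofList [char]], s.2))
    ([], false)
  PySem.Str.join "" st.1

-- ===== PORT B =====
def apply_quote_style_to_text_alt (txt : String) (quote_language : String) : String :=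
  let qs := pvQUOTE_STYLES.getD quote_language (pvQUOTE_STYLES.getD "english-double" ("\"", "\""))
  match PySem.Str.split? txt "\"" with
  | none => ""            -- unreachable totality guard: the separator is non-empty
  | some [] => ""         -- unreachable totality guard: split always yields at least one part
  | some (p0 :: rest) =>
    PySem.Str.join ""
      ((PySem.List.enumerate rest 1).foldl
        (fun acc iseg => acc ++ [if iseg.1 % 2 == 1 then qs.1 else qs.2] ++ [iseg.2])
        [p0])

-- ===== PRECONDITION & SPEC =====
def Spec_apply_quote_style_to_text (txt : String) (quote_language : String) (out : String) : Prop := out = apply_quote_style_to_text_alt txt quote_language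
instance (txt : String) (quote_language : String) (out : String) : Decidable (Spec_apply_quote_style_to_text txt quote_language out) := by unfold Spec_apply_quote_style_to_text; infer_instance

-- ===== CLAIM (what is proved, stated in full; the proofs are below) =====
def Claim_equal_apply_quote_style_to_text : Prop := ∀ (txt : String) (quote_language : String), Dom_apply_quote_style_to_text txt quote_language → Spec_apply_quote_style_to_text txt quote_language (apply_quote_style_to_text txt quote_language)

-- ===== LEMMAS AND PROOFS =====

-- simple structural model of txt.split('"')
def pvSplitQ : List Char → List (List Char)
  | [] => [[]]
  | c :: r =>
    if c = '"' then [] :: pvSplitQ r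
    else
      match pvSplitQ r with
      | [] => [[c]]
      | h :: t => (c :: h) :: t

theorem pvSplitQ_ne_nil (cs : List Char) : pvSplitQ cs ≠ [] := by
  induction cs with
  | nil => simp [pvSplitQ]
  | cons c r ih =>
    simp only [pvSplitQ]
    split
    · simp
    · cases h : pvSplitQ r <;> simp

theorem pv_splitOn_go (fuel : Nat) :
    ∀ (l cur : List Char) (acc : List (List Char)), l.length < fuel →
      PySem.Chars.splitOn.go ['"'] fuel l cur acc =
        acc.reverse ++ (cur.reverse ++ (pvSplitQ l).headI) :: (pvSplitQ l).tail := by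
  induction fuel with
  | zero => intro l cur acc h; omega
  | succ f ih =>
    intro l cur acc h
    cases l with
    | nil =>
      simp [PySem.Chars.splitOn.go, pvSplitQ]
    | cons c rest =>
      by_cases hc : c = '"'
      · subst hc
        rw [PySem.Chars.splitOn.go]
        simp only [List.isPrefixOf, beq_self_eq_true, Bool.true_and, if_true,
          List.length_cons, List.length_nil, List.drop_succ_cons, List.drop_zero]
        rw [ih rest [] (cur.reverse :: acc) (by simp at h; omega)]
        simp only [pvSplitQ]
        rcases hsp : pvSplitQ rest with _ | ⟨h1, t1⟩
        · exact absurd hsp (pvSplitQ_ne_nil rest)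
        · simp
      · rw [PySem.Chars.splitOn.go]
        have hpre : List.isPrefixOf ['"'] (c :: rest) = false := by
          simp [List.isPrefixOf]
          exact fun h' => hc h'.symm
        rw [hpre]
        simp only [Bool.false_eq_true, if_false]
        rw [ih rest (c :: cur) acc (by simp at h; omega)]
        simp only [pvSplitQ, if_neg hc]
        rcases hsp : pvSplitQ rest with _ | ⟨h1, t1⟩
        · exact absurd hsp (pvSplitQ_ne_nil rest)
        · simp

theorem pv_splitOn_quote (cs : List Char) :
    PySem.Chars.splitOn cs ['"'] = pvSplitQ cs := by
  rw [PySem.Chars.splitOn, pv_splitOn_go (cs.length + 1) cs [] [] (by omega)]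
  rcases hsp : pvSplitQ cs with _ | ⟨h1, t1⟩
  · exact absurd hsp (pvSplitQ_ne_nil cs)
  · simp

-- pure model of A's loop output, as a list of chars
def pvA (o c : List Char) : List Char → Bool → List Char
  | [], _ => []
  | ch :: r, b =>
    if ch = '"' then (if b then c else o) ++ pvA o c r (!b)
    else ch :: pvA o c r b

-- pure model of B's quote/segment interleaving over the gap segments
def pvB (o c : List Char) : List (List Char) → Int → List Char
  | [], _ => []
  | p :: ps, i => (if i % 2 == 1 then o else c) ++ p ++ pvB o c ps (i + 1)

-- the heart of the equivalence: A's toggle-loop equals head-of-split plus parity interleaving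
theorem pv_key (o c : List Char) :
    ∀ (cs : List Char) (b : Bool) (i : Int), ((i % 2 == 1) = !b) →
      pvA o c cs b = (pvSplitQ cs).headI ++ pvB o c (pvSplitQ cs).tail i := by
  intro cs
  induction cs with
  | nil => intro b i hi; simp [pvA, pvSplitQ, pvB]
  | cons ch r ih =>
    intro b i hi
    by_cases hc : ch = '"'
    · subst hc
      have hi' : ((i + 1) % 2 == 1) = !(!b) := by
        rcases Bool.eq_false_or_eq_true b with hb | hb <;> subst hb <;>
          simp_all <;> omega
      rw [show pvA o c ('"' :: r) b = (if b then c else o) ++ pvA o c r (!b) from by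
        simp [pvA]]
      rw [ih (!b) (i + 1) hi']
      simp only [pvSplitQ]
      rcases hsp : pvSplitQ r with _ | ⟨h1, t1⟩
      · exact absurd hsp (pvSplitQ_ne_nil r)
      · have hq : (i % 2 = 1) ↔ (b = false) := by cases b <;> simp_all
        simp [pvB, hq]
        cases b <;> simp
    · rw [show pvA o c (ch :: r) b = ch :: pvA o c r b from by simp [pvA, hc]]
      rw [ih b i hi]
      simp only [pvSplitQ, if_neg hc]
      rcases hsp : pvSplitQ r with _ | ⟨h1, t1⟩
      · exact absurd hsp (pvSplitQ_ne_nil r)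
      · simp

theorem pv_join_nil (xss : List (List Char)) : PySem.Chars.join [] xss = xss.flatten := by
  induction xss with
  | nil => simp [PySem.Chars.join_nil]
  | cons x xs ih =>
    cases xs with
    | nil => simp [PySem.Chars.join_singleton]
    | cons y ys =>
      rw [PySem.Chars.join_cons_cons, ih]
      simp

-- A's foldl produces exactly pvA (flattened to chars)
theorem pv_foldA (o c : String) :
    ∀ (cs : List Char) (acc : List String) (b : Bool),
      (((cs.foldl (fun (s : List String × Bool) char =>
          if char == '"' then (s.1 ++ [if s.2 then c else o], !s.2)
          else (s.1 ++ [String.ofList [char]], s.2)) (acc, b)).1).map String.toList).flatten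
      = (acc.map String.toList).flatten ++ pvA o.toList c.toList cs b := by
  intro cs
  induction cs with
  | nil => intro acc b; simp [pvA]
  | cons ch r ih =>
    intro acc b
    by_cases hc : ch = '"'
    · subst hc
      rw [List.foldl_cons]
      simp only [beq_self_eq_true, if_true]
      rw [ih]
      cases b <;> simp [pvA]
    · rw [List.foldl_cons]
      rw [if_neg (by simp [hc] : ¬((ch == '"') = true))]
      rw [ih]
      simp [pvA, hc]

-- B's foldl over enumerate produces exactly pvB (flattened to chars)
theorem pv_foldB (o c : String) :
    ∀ (ps : List String) (i : Int) (acc : List String),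
      (((PySem.List.enumerate ps i).foldl
          (fun acc iseg => acc ++ [if iseg.1 % 2 == 1 then o else c] ++ [iseg.2]) acc).map String.toList).flatten
      = (acc.map String.toList).flatten ++ pvB o.toList c.toList (ps.map String.toList) i := by
  intro ps
  induction ps with
  | nil => intro i acc; simp [PySem.List.enumerate_nil, pvB]
  | cons p pr ih =>
    intro i acc
    rw [PySem.List.enumerate_cons, List.foldl_cons, ih]
    by_cases hi : i % 2 = 1 <;> simp [pvB, hi]

theorem pv_main (txt quote_language : String) :
    apply_quote_style_to_text txt quote_language = apply_quote_style_to_text_alt txt quote_language := by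
  unfold apply_quote_style_to_text apply_quote_style_to_text_alt
  set qs := pvQUOTE_STYLES.getD quote_language (pvQUOTE_STYLES.getD "english-double" ("\"", "\"")) with hqs
  have hsplit : PySem.Str.split? txt "\"" = some ((pvSplitQ txt.toList).map String.ofList) := by
    simp only [PySem.Str.split?, PySem.Chars.split?]
    rw [show ("\"" : String).toList = ['"'] from rfl]
    simp [pv_splitOn_quote]
  rcases hsp : pvSplitQ txt.toList with _ | ⟨h, t⟩
  · exact absurd hsp (pvSplitQ_ne_nil txt.toList)
  · rw [hsplit, hsp]
    simp only [List.map_cons]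
    rw [PySem.Str.join, PySem.Str.join]
    rw [show ("" : String).toList = [] from rfl]
    rw [pv_join_nil, pv_join_nil]
    congr 1
    rw [pv_foldA qs.1 qs.2 txt.toList [] false]
    rw [pv_foldB qs.1 qs.2 (t.map String.ofList) 1 [String.ofList h]]
    rw [pv_key qs.1.toList qs.2.toList txt.toList false 1 (by decide)]
    rw [hsp]
    have hmap : List.map (String.toList ∘ String.ofList) t = t := by
      simp [Function.comp_def]
    simp [hmap]

-- ===== VERDICT (by name: the statement is the Claim_ definition above) =====
theorem apply_quote_style_to_text_spec : Claim_equal_apply_quote_style_to_text := by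
  intro txt quote_language _
  unfold Spec_apply_quote_style_to_text
  exact pv_main txt quote_language
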